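-- pv_equiv track=rewrite | github.com/uym2/TreeShrink | Tree_extend.py | __MoRm1_score
-- ===== SOURCE A (Python) =====
-- def __MoRm1_score(lists):
--     n = len(lists)
--     score = None
--     for i in range(n-1):
--         max_i = max(lists[i])
--         for j in range(i+1,n):
--             max_j = max(lists[j])
--             if len(lists[i]) < 2:
--                 delta = abs(max_i-max_j)
--                 if score is None or delta < score:
--                     score = delta
--             else:
--                 for k in range(len(lists[i])):
--                     list_i_rm_k = [lists[i][x] for x in range(len(lists[i])) if x != k ]
--                     delta = abs(max(list_i_rm_k)-max_j)
--                     if score is None or delta < score: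
--                         score = delta
--
--             if len(lists[j]) < 2:
--                 delta = abs(max_i-max_j)
--                 if score is None or delta < score:
--                     score = delta
--             else:
--                 for k in range(len(lists[j])):
--                     list_j_rm_k = [lists[j][x] for x in range(len(lists[j])) if x != k ]
--                     delta = abs(max(list_j_rm_k)-max_i)
--                     if score is None or delta < score:
--                         score = delta
--     if score is None:
--         return 0
--     else:
--         return score
-- ===== SOURCE B (Python) =====
-- def _stat(l):
--     # (max, second-max-after-removing-one-max) ; second component None when len(l) < 2
--     m = max(l)
--     if len(l) >= 2:
--         rest = list(l)
--         rest.remove(m)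
--         return (m, max(rest))
--     return (m, None)
--
-- def __MoRm1_score(lists):
--     if len(lists) < 2:
--         return 0
--     stats = [_stat(l) for l in lists]
--     best = None
--     while stats:
--         (mi, si) = stats[0]
--         stats = stats[1:]
--         for (mj, sj) in stats:
--             d = abs(mi - mj)
--             if si is not None and abs(si - mj) < d:
--                 d = abs(si - mj)
--             if sj is not None and abs(sj - mi) < d:
--                 d = abs(sj - mi)
--             if best is None or d < best:
--                 best = d
--     return best
-- ===== Notes on version B (the rewrite author's own statement) =====
-- stated objective: faster
-- what changed: A recopies and re-maximizes lists[i] minus one index for every pair and every removal index (O(n^2*L^2)); B precomputes per list (max, max-after-removing-one-max-occurrence) once and takes the minimum of at most three O(1) candidate deltas per pair (O(n*L + n^2)).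
import Mathlib
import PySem

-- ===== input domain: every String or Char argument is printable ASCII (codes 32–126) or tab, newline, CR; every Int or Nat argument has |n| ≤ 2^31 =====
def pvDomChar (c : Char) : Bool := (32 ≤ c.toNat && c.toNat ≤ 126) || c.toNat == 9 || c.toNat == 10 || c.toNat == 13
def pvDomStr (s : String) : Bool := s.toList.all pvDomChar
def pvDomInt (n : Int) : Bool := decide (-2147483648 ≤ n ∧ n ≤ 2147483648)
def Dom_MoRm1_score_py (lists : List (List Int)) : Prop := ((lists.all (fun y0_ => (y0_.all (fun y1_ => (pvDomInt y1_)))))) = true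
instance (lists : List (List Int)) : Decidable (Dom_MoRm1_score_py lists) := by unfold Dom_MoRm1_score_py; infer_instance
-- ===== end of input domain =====

-- B replaces A's per-pair re-scan (rebuild lists[i] minus each index and re-maximize) by a one-pass
-- precomputation of (max, max-after-removing-one-max) per list; equivalence of the return values is proved.

-- ===== PORT A =====
-- 'if score is None or delta < score: score = delta' (shared by both Pythons)
def pvUpd (score : Option Int) (delta : Int) : Option Int :=
  match score with
  | none => some delta
  | some s => if delta < s then some delta else some s

-- 'max(l)'; default 0 unreachable: Pre_ keeps every maximized list nonempty
def pvMax (l : List Int) : Int := (PySem.List.max? l (fun y => y)).getD 0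

-- '[l[x] for x in range(len(l)) if x != k]'
def pvRmIdx (l : List Int) (k : Int) : List Int :=
  ((PySem.List.pyRange 0 (l.length : Int) 1).filter (fun x => x != k)).map
    (fun x => PySem.List.pyGetD l x 0)

def MoRm1_score_py (lists : List (List Int)) : Int :=
  let n : Int := (lists.length : Int)
  let score : Option Int :=
    (PySem.List.pyRange 0 (n - 1) 1).foldl (fun score i =>
      let li := PySem.List.pyGetD lists i []
      let maxi := pvMax li
      (PySem.List.pyRange (i + 1) n 1).foldl (fun score j =>
        let lj := PySem.List.pyGetD lists j []
        let maxj := pvMax lj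
        let score :=
          if li.length < 2 then pvUpd score |maxi - maxj|
          else (PySem.List.pyRange 0 (li.length : Int) 1).foldl
            (fun score k => pvUpd score |pvMax (pvRmIdx li k) - maxj|) score
        if lj.length < 2 then pvUpd score |maxi - maxj|
        else (PySem.List.pyRange 0 (lj.length : Int) 1).foldl
          (fun score k => pvUpd score |pvMax (pvRmIdx lj k) - maxi|) score
      ) score) none
  match score with
  | none => 0
  | some s => s

-- ===== PORT B =====
-- _stat(l): (max, max after removing one occurrence of the max); None second component when len < 2
def pvStat (l : List Int) : Int × Option Int :=
  let m := pvMax l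
  if 2 ≤ l.length then (m, some (pvMax ((PySem.List.remove? l m).getD []))) else (m, none)

-- the body of B's inner 'for (mj, sj) in stats' d-computation
def pvPairDelta (mi : Int) (si : Option Int) (mj : Int) (sj : Option Int) : Int :=
  let d := |mi - mj|
  let d := match si with | some s => if |s - mj| < d then |s - mj| else d | none => d
  match sj with | some s => if |s - mi| < d then |s - mi| else d | none => d

-- B's 'while stats: head; tail; inner for'
def pvBLoop : List (Int × Option Int) → Option Int → Option Int
  | [], best => best
  | p :: rest, best =>
      pvBLoop rest (rest.foldl (fun best q => pvUpd best (pvPairDelta p.1 p.2 q.1 q.2)) best)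

def MoRm1_score_py_alt (lists : List (List Int)) : Int :=
  if lists.length < 2 then 0
  else
    -- 'return best': with ≥ 2 lists the loop ran on at least one pair, so best is never None
    match pvBLoop (lists.map pvStat) none with
    | none => 0
    | some b => b

-- ===== PRECONDITION & SPEC =====
-- When there are ≥ 2 lists, Python's max() is called on every list: an empty member raises ValueError.
def Pre_MoRm1_score_py (lists : List (List Int)) : Prop :=
  2 ≤ lists.length → ∀ l ∈ lists, l ≠ []
instance (lists : List (List Int)) : Decidable (Pre_MoRm1_score_py lists) := by
  unfold Pre_MoRm1_score_py; infer_instance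
def pvWitness_MoRm1_score_py : List (List Int) := [[1, 5, 2], [3], [4, 4]]

def Spec_MoRm1_score_py (lists : List (List Int)) (out : Int) : Prop := out = MoRm1_score_py_alt lists
instance (lists : List (List Int)) (out : Int) : Decidable (Spec_MoRm1_score_py lists out) := by
  unfold Spec_MoRm1_score_py; infer_instance

-- ===== CLAIM (what is proved, stated in full; the proofs are below) =====
def Claim_equal_MoRm1_score_py : Prop := ∀ (lists : List (List Int)), Dom_MoRm1_score_py lists → Pre_MoRm1_score_py lists → Spec_MoRm1_score_py lists (MoRm1_score_py lists)

-- ===== LEMMAS AND PROOFS =====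

-- pvUpd is 'min', with none as +infinity
theorem pvUpd_some (v d : Int) : pvUpd (some v) d = some (min v d) := by
  show (if d < v then some d else some v) = some (min v d)
  by_cases h : d < v
  · rw [if_pos h, min_eq_right h.le]
  · rw [if_neg h, min_eq_left (by omega)]

theorem pvUpd_pvUpd (s : Option Int) (a b : Int) :
    pvUpd (pvUpd s a) b = pvUpd s (min a b) := by
  cases s with
  | none => show pvUpd (some a) b = some (min a b); rw [pvUpd_some]
  | some v => rw [pvUpd_some, pvUpd_some, pvUpd_some, min_assoc]

theorem foldl_pvUpd_some (L : List Int) (v : Int) :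
    L.foldl pvUpd (some v) = some (L.foldl min v) := by
  induction L generalizing v with
  | nil => rfl
  | cons d t ih => rw [List.foldl_cons, List.foldl_cons, pvUpd_some, ih]

-- a fold of min over a list whose elements all lie in {a, b}, with both present
theorem foldl_min_two (L : List Int) (a b : Int)
    (hL : ∀ x ∈ L, x = a ∨ x = b) (ha : a ∈ L) (hb : b ∈ L) (v : Int) :
    L.foldl min v = min v (min a b) := by
  obtain ⟨h1, h2⟩ := PySem.List.foldl_min_le L v
  apply le_antisymm
  · exact le_min h1 (le_min (h2 a ha) (h2 b hb))
  · rcases PySem.List.foldl_min_mem L v with h | h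
    · rw [h]; exact min_le_left _ _
    · rcases hL _ h with he | he <;> rw [he]
      · exact le_trans (min_le_right _ _) (min_le_left _ _)
      · exact le_trans (min_le_right _ _) (min_le_right _ _)

theorem foldl_pvUpd_two (L : List Int) (a b : Int)
    (hL : ∀ x ∈ L, x = a ∨ x = b) (ha : a ∈ L) (hb : b ∈ L) (s : Option Int) :
    L.foldl pvUpd s = pvUpd (pvUpd s a) b := by
  cases s with
  | some v =>
    rw [foldl_pvUpd_some, pvUpd_some, pvUpd_some, foldl_min_two L a b hL ha hb, min_assoc]
  | none =>
    cases L with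
    | nil => cases ha
    | cons d t =>
      rw [List.foldl_cons]
      have hnd : pvUpd none d = some d := rfl
      rw [hnd, foldl_pvUpd_some]
      have hab : pvUpd (pvUpd none a) b = some (min a b) := by
        have h' : pvUpd none a = some a := rfl
        rw [h', pvUpd_some]
      rw [hab]
      congr 1
      obtain ⟨hle, hmem⟩ := PySem.List.foldl_min_le t d
      apply le_antisymm
      · have hfa : t.foldl min d ≤ a := by
          rcases List.mem_cons.mp ha with he | h
          · rw [he]; exact hle
          · exact hmem a h
        have hfb : t.foldl min d ≤ b := by
          rcases List.mem_cons.mp hb with he | h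
          · rw [he]; exact hle
          · exact hmem b h
        exact le_min hfa hfb
      · rcases PySem.List.foldl_min_mem t d with h | h
        · rw [h]
          rcases hL d (List.mem_cons_self) with he | he <;> rw [he]
          · exact min_le_left _ _
          · exact min_le_right _ _
        · rcases hL _ (List.mem_cons_of_mem _ h) with he | he <;> rw [he]
          · exact min_le_left _ _
          · exact min_le_right _ _

-- indexed variant: a pvUpd-fold whose pushed values all lie in {a, b}, both attained
theorem foldl_pvUpd_two' {γ : Type} (L : List γ) (h : γ → Int) (a b : Int)
    (hL : ∀ x ∈ L, h x = a ∨ h x = b)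
    (ha : ∃ x ∈ L, h x = a) (hb : ∃ x ∈ L, h x = b) (s : Option Int) :
    L.foldl (fun sc x => pvUpd sc (h x)) s = pvUpd (pvUpd s a) b := by
  have hmain := foldl_pvUpd_two (L.map h) a b
    (by intro x hx; obtain ⟨y, hy, rfl⟩ := List.mem_map.mp hx; exact hL y hy)
    (by obtain ⟨y, hy, hv⟩ := ha; exact List.mem_map.mpr ⟨y, hy, hv⟩)
    (by obtain ⟨y, hy, hv⟩ := hb; exact List.mem_map.mpr ⟨y, hy, hv⟩) s
  rw [List.foldl_map] at hmain
  exact hmain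

-- pvMax characterization
theorem pvMax_spec (l : List Int) (h : l ≠ []) :
    pvMax l ∈ l ∧ ∀ x ∈ l, x ≤ pvMax l := by
  cases hm : PySem.List.max? l (fun y => y) with
  | none => exact absurd ((PySem.List.max?_eq_none_iff l (fun y => y)).mp hm) h
  | some m =>
    unfold pvMax
    rw [hm]
    exact ⟨PySem.List.max?_mem hm, fun x hx => by simpa using PySem.List.max?_isMax hm x hx⟩

theorem pvMax_mem (l : List Int) (h : l ≠ []) : pvMax l ∈ l := (pvMax_spec l h).1

theorem pvMax_isMax (l : List Int) (h : l ≠ []) : ∀ x ∈ l, x ≤ pvMax l := (pvMax_spec l h).2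

theorem pvMax_eq_of (l : List Int) (v : Int) (hv : v ∈ l) (hmax : ∀ x ∈ l, x ≤ v) :
    pvMax l = v := by
  have hne : l ≠ [] := by rintro rfl; cases hv
  exact le_antisymm (hmax _ (pvMax_mem l hne)) (pvMax_isMax l hne v hv)

-- the prefix of pyGetD-values is take
theorem map_pyGetD_range_take (l : List Int) (k : Nat) (hk : k ≤ l.length) :
    (PySem.List.pyRange 0 (k : Int) 1).map (fun j => PySem.List.pyGetD l j 0) = l.take k := by
  induction k with
  | zero => simp [PySem.List.pyRange_one_eq_nil]
  | succ k ih =>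
    have hk' : k ≤ l.length := by omega
    have hkl : k < l.length := by omega
    rw [show ((k + 1 : Nat) : Int) = (k : Int) + 1 by push_cast; ring,
        PySem.List.pyRange_one_succ_right (by omega), List.map_append, ih hk']
    rw [List.take_add_one]
    simp [List.getD_eq_getElem?_getD, List.getElem?_eq_getElem hkl]

-- the comprehension is eraseIdx
theorem pvRmIdx_eq_eraseIdx (l : List Int) (k : Nat) (hk : k < l.length) :
    pvRmIdx l (k : Int) = l.eraseIdx k := by
  unfold pvRmIdx
  rw [PySem.List.pyRange_one_append 0 (k : Int) (l.length : Int) (by omega) (by omega),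
      List.filter_append,
      PySem.List.pyRange_one_cons (a := (k : Int)) (b := (l.length : Int)) (by omega)]
  have hf1 : (PySem.List.pyRange 0 (k : Int) 1).filter (fun x => x != (k : Int))
      = PySem.List.pyRange 0 (k : Int) 1 := by
    apply List.filter_eq_self.mpr
    intro x hx
    have hb := PySem.List.mem_pyRange_one.mp hx
    simp only [bne_iff_ne, ne_eq]
    omega
  have hf2 : (PySem.List.pyRange ((k : Int) + 1) (l.length : Int) 1).filter
        (fun x => x != (k : Int))
      = PySem.List.pyRange ((k : Int) + 1) (l.length : Int) 1 := by
    apply List.filter_eq_self.mpr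
    intro x hx
    have hb := PySem.List.mem_pyRange_one.mp hx
    simp only [bne_iff_ne, ne_eq]
    omega
  have hhead : (((k : Int) :: PySem.List.pyRange ((k : Int) + 1) (l.length : Int) 1).filter
        (fun x => x != (k : Int)))
      = (PySem.List.pyRange ((k : Int) + 1) (l.length : Int) 1).filter
        (fun x => x != (k : Int)) := by
    simp
  rw [hhead, hf1, hf2, List.map_append]
  rw [map_pyGetD_range_take l k hk.le]
  rw [PySem.List.map_pyGetD_pyRange' (xs := l) (a := (k : Int) + 1) (d := 0) (by omega)]
  rw [List.eraseIdx_eq_take_drop_succ]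
  have htn : ((k : Int) + 1).toNat = k + 1 := by omega
  rw [htn]

-- second max: pvSec l = max of l minus one occurrence of its max
def pvSec (l : List Int) : Int := pvMax ((PySem.List.remove? l (pvMax l)).getD [])

theorem mem_eraseIdx_of_take_or_drop (l : List Int) (k : Nat) (x : Int)
    (h : x ∈ l.take k ∨ x ∈ l.drop (k + 1)) : x ∈ l.eraseIdx k := by
  rw [List.eraseIdx_eq_take_drop_succ, List.mem_append]; exact h

theorem maxRm_mem_pair (l : List Int) (h2 : 2 ≤ l.length) (k : Nat) (hk : k < l.length) :
    pvMax (l.eraseIdx k) = pvMax l ∨ pvMax (l.eraseIdx k) = pvSec l := by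
  have hlne : l ≠ [] := by intro h; rw [h] at h2; simp at h2
  have hmem : pvMax l ∈ l := pvMax_mem l hlne
  by_cases hm : pvMax l ∈ l.eraseIdx k
  · left
    exact pvMax_eq_of _ _ hm
      (fun x hx => pvMax_isMax l hlne x ((l.eraseIdx_sublist k).subset hx))
  · right
    have hsplit : pvMax l ∈ l.take k ∨ pvMax l = l[k] ∨ pvMax l ∈ l.drop (k + 1) := by
      have h' : pvMax l ∈ l.take k ++ l[k] :: l.drop (k + 1) := by
        rw [← List.drop_eq_getElem_cons hk, List.take_append_drop]
        exact hmem
      rcases List.mem_append.mp h' with h | h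
      · exact Or.inl h
      · rcases List.mem_cons.mp h with h | h
        · exact Or.inr (Or.inl h)
        · exact Or.inr (Or.inr h)
    have heq : l[k] = pvMax l := by
      rcases hsplit with h | h | h
      · exact absurd (mem_eraseIdx_of_take_or_drop l k _ (Or.inl h)) hm
      · exact h.symm
      · exact absurd (mem_eraseIdx_of_take_or_drop l k _ (Or.inr h)) hm
    have htk : pvMax l ∉ l.take k := fun h =>
      hm (mem_eraseIdx_of_take_or_drop l k _ (Or.inl h))
    have herase : l.erase (pvMax l) = l.eraseIdx k := by
      have hstep : (l.take k ++ l[k] :: l.drop (k + 1)).erase (pvMax l)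
          = l.take k ++ l.drop (k + 1) := by
        rw [List.erase_append_right _ htk, heq, List.erase_cons_head]
      rw [← List.drop_eq_getElem_cons hk, List.take_append_drop] at hstep
      rw [hstep, List.eraseIdx_eq_take_drop_succ]
    unfold pvSec
    rw [PySem.List.remove?_eq_some_erase l (pvMax l) hmem]
    show pvMax (l.eraseIdx k) = pvMax (l.erase (pvMax l))
    rw [herase]

theorem exists_maxRm_eq_max (l : List Int) (h2 : 2 ≤ l.length) :
    ∃ k : Nat, k < l.length ∧ pvMax (l.eraseIdx k) = pvMax l := by
  have hlne : l ≠ [] := by intro h; rw [h] at h2; simp at h2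
  by_cases hm : pvMax l ∈ l.eraseIdx 0
  · exact ⟨0, by omega, pvMax_eq_of _ _ hm
      (fun x hx => pvMax_isMax l hlne x ((l.eraseIdx_sublist 0).subset hx))⟩
  · cases l with
    | nil => cases hlne rfl
    | cons x t =>
      have hx : pvMax (x :: t) = x := by
        rcases List.mem_cons.mp (pvMax_mem _ hlne) with h | h
        · exact h
        · exact absurd (by simpa using h) hm
      refine ⟨1, by simpa using h2, pvMax_eq_of _ _ ?_ ?_⟩
      · rw [hx, List.eraseIdx_cons_succ]; exact List.mem_cons_self
      · intro z hz
        rw [List.eraseIdx_cons_succ] at hz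
        rcases List.mem_cons.mp hz with he | hz
        · rw [he, hx]
        · exact pvMax_isMax _ hlne z
            (List.mem_cons_of_mem _ ((t.eraseIdx_sublist 0).subset hz))

theorem exists_maxRm_eq_sec (l : List Int) (h2 : 2 ≤ l.length) :
    ∃ k : Nat, k < l.length ∧ pvMax (l.eraseIdx k) = pvSec l := by
  have hlne : l ≠ [] := by intro h; rw [h] at h2; simp at h2
  have hmem : pvMax l ∈ l := pvMax_mem l hlne
  obtain ⟨l1, l2, hnot, hdec, herase⟩ := List.exists_erase_eq hmem
  refine ⟨l1.length, ?_, ?_⟩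
  · rw [hdec]; simp
  · have heidx : l.eraseIdx l1.length = l1 ++ l2 := by
      rw [hdec, List.eraseIdx_eq_take_drop_succ]
      congr 1
      · exact List.take_left
      · rw [show l1.length + 1 = (l1 ++ [pvMax l]).length by simp,
            show l1 ++ pvMax l :: l2 = (l1 ++ [pvMax l]) ++ l2 by simp]
        exact List.drop_left
    unfold pvSec
    rw [PySem.List.remove?_eq_some_erase l (pvMax l) hmem, heidx]
    show pvMax (l1 ++ l2) = pvMax (l.erase (pvMax l))
    rw [herase]

-- A's one-sided removal loop collapses to two pvUpd steps
theorem foldl_rm_loop (l : List Int) (h2 : 2 ≤ l.length) (c : Int) (s : Option Int) :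
    (PySem.List.pyRange 0 (l.length : Int) 1).foldl
      (fun score k => pvUpd score |pvMax (pvRmIdx l k) - c|) s
    = pvUpd (pvUpd s |pvMax l - c|) |pvSec l - c| := by
  refine foldl_pvUpd_two' _ (fun k => |pvMax (pvRmIdx l k) - c|) _ _ ?_ ?_ ?_ s
  · intro x hx
    obtain ⟨hk0, hklt⟩ := PySem.List.mem_pyRange_one.mp hx
    have hlt : x.toNat < l.length := by omega
    show |pvMax (pvRmIdx l x) - c| = |pvMax l - c| ∨ |pvMax (pvRmIdx l x) - c| = |pvSec l - c|
    rw [show x = ((x.toNat : Nat) : Int) by omega, pvRmIdx_eq_eraseIdx l x.toNat hlt]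
    rcases maxRm_mem_pair l h2 x.toNat hlt with h | h <;> rw [h]
    · exact Or.inl rfl
    · exact Or.inr rfl
  · obtain ⟨k, hk, hval⟩ := exists_maxRm_eq_max l h2
    refine ⟨(k : Int), PySem.List.mem_pyRange_one.mpr ⟨by omega, by omega⟩, ?_⟩
    show |pvMax (pvRmIdx l ((k : Nat) : Int)) - c| = |pvMax l - c|
    rw [pvRmIdx_eq_eraseIdx l k hk, hval]
  · obtain ⟨k, hk, hval⟩ := exists_maxRm_eq_sec l h2
    refine ⟨(k : Int), PySem.List.mem_pyRange_one.mpr ⟨by omega, by omega⟩, ?_⟩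
    show |pvMax (pvRmIdx l ((k : Nat) : Int)) - c| = |pvSec l - c|
    rw [pvRmIdx_eq_eraseIdx l k hk, hval]

-- (if x < y then x else y) is min
theorem if_lt_eq_min (x y : Int) : (if x < y then x else y) = min y x := by
  rw [min_def]; split_ifs <;> omega

-- three small min identities for the per-pair collapse
theorem minEq_aa (a : Int) : min a a = a := min_self a
theorem minEq_aad (a d : Int) : min a (min a d) = min a d := by
  rw [min_def, min_def]; split_ifs <;> omega
theorem minEq_aba (a b : Int) : min a (min b a) = min a b := by
  rw [min_def, min_def, min_def]; split_ifs <;> omega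
theorem minEq_abad (a b d : Int) : min a (min b (min a d)) = min (min a b) d := by
  rw [min_def, min_def, min_def, min_def, min_def]; split_ifs <;> omega

-- A's per-pair update (the two branch blocks for one (i, j) pair)
def pvABody (li lj : List Int) (s : Option Int) : Option Int :=
  let maxi := pvMax li
  let maxj := pvMax lj
  let score :=
    if li.length < 2 then pvUpd s |maxi - maxj|
    else (PySem.List.pyRange 0 (li.length : Int) 1).foldl
      (fun score k => pvUpd score |pvMax (pvRmIdx li k) - maxj|) s
  if lj.length < 2 then pvUpd score |maxi - maxj|
  else (PySem.List.pyRange 0 (lj.length : Int) 1).foldl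
    (fun score k => pvUpd score |pvMax (pvRmIdx lj k) - maxi|) score

-- B's per-pair delta in closed form, per shape of the stat pair
theorem pairDelta_nn (mi mj : Int) : pvPairDelta mi none mj none = |mi - mj| := rfl

theorem pairDelta_sn (mi si mj : Int) :
    pvPairDelta mi (some si) mj none = min |mi - mj| |si - mj| := by
  show (if |si - mj| < |mi - mj| then |si - mj| else |mi - mj|) = min |mi - mj| |si - mj|
  rw [if_lt_eq_min]

theorem pairDelta_ns (mi mj sj : Int) :
    pvPairDelta mi none mj (some sj) = min |mi - mj| |sj - mi| := by
  show (if |sj - mi| < |mi - mj| then |sj - mi| else |mi - mj|) = min |mi - mj| |sj - mi|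
  rw [if_lt_eq_min]

theorem pairDelta_ss (mi si mj sj : Int) :
    pvPairDelta mi (some si) mj (some sj)
      = min (min |mi - mj| |si - mj|) |sj - mi| := by
  show (if |sj - mi| < (if |si - mj| < |mi - mj| then |si - mj| else |mi - mj|)
        then |sj - mi|
        else (if |si - mj| < |mi - mj| then |si - mj| else |mi - mj|))
      = min (min |mi - mj| |si - mj|) |sj - mi|
  rw [if_lt_eq_min, if_lt_eq_min]

theorem pvStat_big (l : List Int) (h2 : 2 ≤ l.length) :
    pvStat l = (pvMax l, some (pvSec l)) := by
  unfold pvStat pvSec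
  rw [if_pos h2]

theorem pvStat_small (l : List Int) (h2 : ¬ 2 ≤ l.length) :
    pvStat l = (pvMax l, none) := by
  unfold pvStat
  rw [if_neg h2]

-- A's per-pair update equals one pvUpd with B's candidate delta
theorem pair_body_eq (li lj : List Int) (_hi : li ≠ []) (_hj : lj ≠ []) (s : Option Int) :
    pvABody li lj s
    = pvUpd s (pvPairDelta (pvStat li).1 (pvStat li).2 (pvStat lj).1 (pvStat lj).2) := by
  by_cases h2i : 2 ≤ li.length <;> by_cases h2j : 2 ≤ lj.length
  · simp only [pvABody]
    rw [if_neg (show ¬ li.length < 2 by omega), if_neg (show ¬ lj.length < 2 by omega)]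
    rw [foldl_rm_loop li h2i (pvMax lj) s, foldl_rm_loop lj h2j (pvMax li)]
    rw [abs_sub_comm (pvMax lj) (pvMax li)]
    rw [pvUpd_pvUpd, pvUpd_pvUpd, pvUpd_pvUpd]
    simp only [pvStat_big li h2i, pvStat_big lj h2j, pairDelta_ss]
    congr 1
    exact minEq_abad _ _ _
  · simp only [pvABody]
    rw [if_neg (show ¬ li.length < 2 by omega), if_pos (show lj.length < 2 by omega)]
    rw [foldl_rm_loop li h2i (pvMax lj) s]
    rw [pvUpd_pvUpd, pvUpd_pvUpd]
    simp only [pvStat_big li h2i, pvStat_small lj h2j, pairDelta_sn]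
    congr 1
    exact minEq_aba _ _
  · simp only [pvABody]
    rw [if_pos (show li.length < 2 by omega), if_neg (show ¬ lj.length < 2 by omega)]
    rw [foldl_rm_loop lj h2j (pvMax li)]
    rw [abs_sub_comm (pvMax lj) (pvMax li)]
    rw [pvUpd_pvUpd, pvUpd_pvUpd]
    simp only [pvStat_small li h2i, pvStat_big lj h2j, pairDelta_ns]
    congr 1
    exact minEq_aad _ _
  · simp only [pvABody]
    rw [if_pos (show li.length < 2 by omega), if_pos (show lj.length < 2 by omega)]
    rw [pvUpd_pvUpd]
    simp only [pvStat_small li h2i, pvStat_small lj h2j, pairDelta_nn]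
    congr 1
    exact minEq_aa _

-- A's outer-loop body, one index i
def pvOuterBody (xs : List (List Int)) (score : Option Int) (i : Int) : Option Int :=
  (PySem.List.pyRange (i + 1) (xs.length : Int) 1).foldl
    (fun score j => pvABody (PySem.List.pyGetD xs i []) (PySem.List.pyGetD xs j []) score) score

theorem outerBody_zero (x : List Int) (t : List (List Int)) (s : Option Int) :
    pvOuterBody (x :: t) s 0 = t.foldl (fun score y => pvABody x y score) s := by
  unfold pvOuterBody
  rw [PySem.List.pyGetD_zero_cons]
  rw [PySem.List.foldl_pyRange_pyGetD' (x :: t) [] (fun score lj => pvABody x lj score) s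
        (show (0 : Int) ≤ 0 + 1 by omega)]
  rw [show ((0 : Int) + 1).toNat = 1 by omega]
  rfl

theorem outerBody_shift (x : List Int) (t : List (List Int)) (acc : Option Int) (k : Nat) :
    pvOuterBody (x :: t) acc (1 + (k : Int)) = pvOuterBody t acc (k : Int) := by
  unfold pvOuterBody
  have hli : PySem.List.pyGetD (x :: t) (1 + (k : Int)) [] = PySem.List.pyGetD t (k : Int) [] := by
    rw [show (1 + (k : Int)) = ((k + 1 : Nat) : Int) by push_cast; ring,
        PySem.List.pyGetD_natCast, PySem.List.pyGetD_natCast, List.getD_cons_succ]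
  rw [hli]
  rw [PySem.List.foldl_pyRange_pyGetD' (x :: t) []
        (fun score lj => pvABody (PySem.List.pyGetD t (k : Int) []) lj score) acc
        (show (0 : Int) ≤ 1 + (k : Int) + 1 by omega),
      PySem.List.foldl_pyRange_pyGetD' t []
        (fun score lj => pvABody (PySem.List.pyGetD t (k : Int) []) lj score) acc
        (show (0 : Int) ≤ (k : Int) + 1 by omega)]
  rw [show (1 + (k : Int) + 1).toNat = k + 2 by omega,
      show ((k : Int) + 1).toNat = k + 1 by omega]
  rw [show (x :: t).drop (k + 2) = t.drop (k + 1) from rfl]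

-- structural form of A's index double loop
def pvPairsFold : List (List Int) → Option Int → Option Int
  | [], s => s
  | x :: t, s => pvPairsFold t (t.foldl (fun score y => pvABody x y score) s)

-- A's index double loop is the structural pair recursion
theorem a_loop_eq (xs : List (List Int)) (s : Option Int) :
    (PySem.List.pyRange 0 ((xs.length : Int) - 1) 1).foldl (pvOuterBody xs) s
    = pvPairsFold xs s := by
  induction xs generalizing s with
  | nil =>
    rw [PySem.List.pyRange_one_eq_nil (by norm_num)]
    simp only [pvPairsFold, List.foldl_nil]
  | cons x t ih =>
    cases t with
    | nil =>
      rw [PySem.List.pyRange_one_eq_nil (by norm_num)]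
      simp only [pvPairsFold, List.foldl_nil]
    | cons y u =>
      have hb : ((x :: y :: u).length : Int) - 1 = ((y :: u).length : Int) := by
        push_cast [List.length_cons]; ring
      rw [hb]
      rw [PySem.List.pyRange_one_cons (a := (0 : Int)) (b := ((y :: u).length : Int))
            (by push_cast [List.length_cons]; omega)]
      rw [List.foldl_cons]
      rw [show pvOuterBody (x :: y :: u) s 0
            = (y :: u).foldl (fun score l => pvABody x l score) s from
          outerBody_zero x (y :: u) s]
      rw [show pvPairsFold (x :: y :: u) s
            = pvPairsFold (y :: u) ((y :: u).foldl (fun score y => pvABody x y score) s)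
          from rfl]
      rw [← ih]
      rw [PySem.List.pyRange_one (0 + 1) (((y :: u).length : Int)),
          PySem.List.pyRange_one 0 ((((y :: u).length : Int)) - 1)]
      rw [show (((y :: u).length : Int) - (0 + 1)).toNat
            = ((((y :: u).length : Int) - 1) - 0).toNat by omega]
      rw [List.foldl_map, List.foldl_map]
      apply PySem.List.foldl_congr_mem
      intro acc k _
      show pvOuterBody (x :: y :: u) acc (0 + 1 + (k : Int))
          = pvOuterBody (y :: u) acc (0 + (k : Int))
      rw [show (0 : Int) + 1 + (k : Int) = 1 + (k : Int) by ring,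
          show (0 : Int) + (k : Int) = (k : Int) by ring]
      exact outerBody_shift x (y :: u) acc k

-- the pair recursion is B's loop over the precomputed stats
theorem pairsFold_eq_bLoop (xs : List (List Int)) (hne : ∀ l ∈ xs, l ≠ []) (s : Option Int) :
    pvPairsFold xs s = pvBLoop (xs.map pvStat) s := by
  induction xs generalizing s with
  | nil => rfl
  | cons x t ih =>
    rw [List.map_cons]
    rw [show pvPairsFold (x :: t) s
          = pvPairsFold t (t.foldl (fun score y => pvABody x y score) s) from rfl]
    rw [show pvBLoop (pvStat x :: t.map pvStat) s
          = pvBLoop (t.map pvStat) ((t.map pvStat).foldl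
              (fun best q => pvUpd best (pvPairDelta (pvStat x).1 (pvStat x).2 q.1 q.2)) s)
        from rfl]
    rw [List.foldl_map]
    have hinner : t.foldl (fun score y => pvABody x y score) s
        = t.foldl (fun best y => pvUpd best
            (pvPairDelta (pvStat x).1 (pvStat x).2 (pvStat y).1 (pvStat y).2)) s :=
      PySem.List.foldl_congr_mem t _ _ s
        (fun acc y hy =>
          pair_body_eq x y (hne x List.mem_cons_self) (hne y (List.mem_cons_of_mem _ hy)) acc)
    rw [hinner]
    exact ih (fun l hl => hne l (List.mem_cons_of_mem _ hl)) _

-- ===== VERDICT (by name: the statement is the Claim_ definition above) =====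
theorem MoRm1_score_py_spec : Claim_equal_MoRm1_score_py := by
  intro lists _hdom hpre
  show MoRm1_score_py lists = MoRm1_score_py_alt lists
  have hA : MoRm1_score_py lists
      = (match pvPairsFold lists none with | none => (0 : Int) | some s => s) := by
    show (match (PySem.List.pyRange 0 ((lists.length : Int) - 1) 1).foldl
            (pvOuterBody lists) none with
          | none => (0 : Int) | some s => s) = _
    rw [a_loop_eq]
  by_cases hlen : lists.length < 2
  · have h0 : pvPairsFold lists none = none := by
      cases lists with
      | nil => rfl
      | cons x t =>
        cases t with
        | nil => simp only [pvPairsFold, List.foldl_nil]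
        | cons y u => exfalso; simp only [List.length_cons] at hlen; omega
    rw [hA, h0]
    show (0 : Int) = MoRm1_score_py_alt lists
    unfold MoRm1_score_py_alt
    rw [if_pos hlen]
  · push_neg at hlen
    rw [hA, pairsFold_eq_bLoop lists (hpre hlen) none]
    unfold MoRm1_score_py_alt
    rw [if_neg (by omega)]
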